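-- pv_equiv track=rewrite | github.com/kyupkyup/algorithms | asd/asd/asd.py | solution
-- ===== SOURCE A (Python) =====
-- def solution(gems):
--     visited = []
--     answer= {}
--     gem_list = []
--     ans = []
--     for i in range(len(gems)):
--         if gems[i] not in gem_list:
--             gem_list.append(gems[i])
--
--     for i in range(len(gems)):
--         if gems[i] not in visited:
--             visited.append(gems[i])
--             answer[gems[i]] = i
--         else:
--             if len(visited) == len(gem_list):
--                 break
--             else:
--                 answer[gems[i]] = i
--     for value in answer.values():
--         ans.append(value)
--     return [min(ans)+1, max(ans)+1]
-- ===== SOURCE B (Python) =====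
-- def solution(gems):
--     # First pass: record each gem type's first-occurrence index.
--     first = {}
--     for i, g in enumerate(gems):
--         if g not in first:
--             first[g] = i
--     # The collection is complete at the largest first-occurrence index.
--     f = max(first.values())
--     # Second pass over the window only: last occurrence of each type inside it.
--     last = {}
--     for i, g in enumerate(gems[:f + 1]):
--         last[g] = i
--     return [min(last.values()) + 1, f + 1]
-- ===== Notes on version B (the rewrite author's own statement) =====
-- stated objective: faster
-- what changed: Replaces A's forward scan-with-break over dedup/visited lists (list membership tests) by two dict passes: a first-occurrence table whose max value is the completion index, then one overwrite pass over the window for last occurrences.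
-- outside the precondition, e.g. on solution([]): A raises ValueError, B raises ValueError
import Mathlib
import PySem

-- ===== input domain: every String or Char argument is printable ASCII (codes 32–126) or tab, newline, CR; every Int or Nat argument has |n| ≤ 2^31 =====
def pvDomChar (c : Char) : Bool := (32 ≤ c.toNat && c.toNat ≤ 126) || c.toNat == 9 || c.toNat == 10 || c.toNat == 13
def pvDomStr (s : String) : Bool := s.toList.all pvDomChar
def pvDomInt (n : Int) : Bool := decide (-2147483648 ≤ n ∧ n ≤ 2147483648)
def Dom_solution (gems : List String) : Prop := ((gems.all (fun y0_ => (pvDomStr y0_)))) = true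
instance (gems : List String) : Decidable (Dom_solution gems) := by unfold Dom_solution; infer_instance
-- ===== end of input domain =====

-- B replaces A's forward scan-with-break by a first-occurrence table whose max gives the
-- completion index, plus one bounded pass for last occurrences (objective: faster).

-- ===== PORT A =====
-- A's second loop: index loop with a possible break; returns the dict `answer`.
def solutionLoop (gems : List String) (i : Nat) (visited : List String)
    (answer : PySem.Dict String Int) (glen : Nat) : PySem.Dict String Int :=
  if h : i < gems.length then
    if gems[i] ∉ visited then
      solutionLoop gems (i + 1) (visited ++ [gems[i]]) (answer.insert gems[i] (i : Int)) glen
    else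
      if visited.length = glen then answer
      else solutionLoop gems (i + 1) visited (answer.insert gems[i] (i : Int)) glen
  else answer
termination_by gems.length - i

def solution (gems : List String) : List Int :=
  let gem_list := gems.foldl (fun gl g => if g ∈ gl then gl else gl ++ [g]) []
  let answer := solutionLoop gems 0 [] PySem.Dict.empty gem_list.length
  let ans := answer.values
  match PySem.List.min? ans (fun x => x), PySem.List.max? ans (fun x => x) with
  | some mn, some mx => [mn + 1, mx + 1]
  | _, _ => []          -- unreachable under Pre_: Python's min/max raise on an empty list

-- ===== PORT B =====
def solution_alt (gems : List String) : List Int :=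
  let first := (PySem.List.enumerate gems).foldl
      (fun d p => if d.contains p.2 then d else d.insert p.2 p.1) PySem.Dict.empty
  match PySem.List.max? first.values (fun x => x) with
  | none => []          -- unreachable under Pre_: Python's max raises on an empty sequence
  | some f =>
    let window := PySem.List.slice gems (some 0) (some (f + 1))
    let last := (PySem.List.enumerate window).foldl
        (fun d p => d.insert p.2 p.1) PySem.Dict.empty
    match PySem.List.min? last.values (fun x => x) with
    | none => []
    | some mn => [mn + 1, f + 1]

-- ===== PRECONDITION & SPEC =====
-- On [] Python A raises ValueError (min of an empty sequence); B raises there too.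
def Pre_solution (gems : List String) : Prop := gems ≠ []
instance (gems : List String) : Decidable (Pre_solution gems) := by unfold Pre_solution; infer_instance
def pvWitness_solution : List String := (["ruby", "dia", "ruby", "opal"])
def Spec_solution (gems : List String) (out : List Int) : Prop := out = solution_alt gems
instance (gems : List String) (out : List Int) : Decidable (Spec_solution gems out) := by unfold Spec_solution; infer_instance

-- ===== CLAIM (what is proved, stated in full; the proofs are below) =====
def Claim_equal_solution : Prop := ∀ (gems : List String), Dom_solution gems → Pre_solution gems → Spec_solution gems (solution gems)

-- ===== LEMMAS AND PROOFS =====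

-- last-occurrence dict of a list (B's second fold; also what A's loop builds)
def lastD (l : List String) : PySem.Dict String Int :=
  (PySem.List.enumerate l).foldl (fun d p => d.insert p.2 p.1) PySem.Dict.empty

-- first-occurrence dict (B's first fold)
def firstD (l : List String) : PySem.Dict String Int :=
  (PySem.List.enumerate l).foldl
    (fun d p => if d.contains p.2 then d else d.insert p.2 p.1) PySem.Dict.empty

lemma enumerate_concat (l : List String) (x : String) :
    PySem.List.enumerate (l ++ [x]) 0 = PySem.List.enumerate l 0 ++ [((l.length : Int), x)] := by
  rw [PySem.List.enumerate_append]
  simp [PySem.List.enumerate]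

lemma lastD_concat (l : List String) (x : String) :
    lastD (l ++ [x]) = (lastD l).insert x (l.length : Int) := by
  unfold lastD
  rw [enumerate_concat, List.foldl_append]
  rfl

lemma firstD_concat (l : List String) (x : String) :
    firstD (l ++ [x]) =
      if (firstD l).contains x then firstD l else (firstD l).insert x (l.length : Int) := by
  unfold firstD
  rw [enumerate_concat, List.foldl_append]
  rfl

lemma firstD_get? (l : List String) (g : String) :
    (firstD l).get? g = (PySem.List.index? l g).map (fun k : Nat => (k : Int)) := by
  induction l using List.reverseRecOn generalizing g with
  | nil => simp [firstD, PySem.List.enumerate, PySem.List.index?]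
  | append_singleton l x ih =>
    rw [firstD_concat, PySem.Dict.contains_eq_isSome_get?]
    by_cases hx : x ∈ l
    · have hs : ((firstD l).get? x).isSome = true := by
        rw [ih x, Option.isSome_map]
        exact (PySem.List.index?_isSome_iff l x).mpr hx
      rw [if_pos hs, ih g]
      by_cases hg : g ∈ l
      · rw [PySem.List.index?_append_of_mem [x] hg]
      · by_cases heq : g = x
        · exact absurd (heq ▸ hx) hg
        · have : g ∉ l ++ [x] := by simp [hg, heq]
          rw [(PySem.List.index?_eq_none_iff l g).mpr hg,
              (PySem.List.index?_eq_none_iff (l ++ [x]) g).mpr this]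
    · have hs : ¬ ((firstD l).get? x).isSome = true := by
        rw [ih x, Option.isSome_map]
        simpa using hx
      rw [if_neg hs]
      by_cases heq : g = x
      · rw [heq, PySem.Dict.get?_insert_self, PySem.List.index?_append_singleton_self l x hx]
        rfl
      · rw [PySem.Dict.get?_insert_of_ne _ _ heq, ih g]
        by_cases hg : g ∈ l
        · rw [PySem.List.index?_append_of_mem [x] hg]
        · have : g ∉ l ++ [x] := by simp [hg, heq]
          rw [(PySem.List.index?_eq_none_iff l g).mpr hg,
              (PySem.List.index?_eq_none_iff (l ++ [x]) g).mpr this]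

lemma firstD_nodup_keys (l : List String) : (firstD l).keys.Nodup := by
  induction l using List.reverseRecOn with
  | nil => exact PySem.Dict.nodup_keys_empty
  | append_singleton l x ih =>
    rw [firstD_concat]
    split
    · exact ih
    · exact PySem.Dict.nodup_keys_insert _ _ _ ih

-- every value of firstD is a first-occurrence index
lemma firstD_values_mem (l : List String) (v : Int)
    (hv : v ∈ (firstD l).values) :
    ∃ k : Nat, v = (k : Int) ∧ ∃ hk : k < l.length, l[k] ∉ l.take k := by
  obtain ⟨⟨g, w⟩, hmem, rfl⟩ := List.mem_map.mp hv
  have hget : (firstD l).get? g = some w := PySem.Dict.get?_of_mem_items _ hmem (firstD_nodup_keys l)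
  rw [firstD_get?] at hget
  obtain ⟨k, hk, rfl⟩ := Option.map_eq_some_iff.mp hget
  obtain ⟨hklt, hgk, hfirst⟩ := PySem.List.getElem_of_index?_eq_some hk
  refine ⟨k, rfl, hklt, ?_⟩
  intro hmem'
  obtain ⟨j, hj, hjk⟩ := List.mem_take_iff_getElem.mp hmem'
  exact hfirst j (lt_of_lt_of_le hj (le_min_iff.mp (le_refl _)).1) (by rw [hjk, hgk])

-- the first-occurrence index of every member is among firstD's values
lemma firstD_values_cover (l : List String) (g : String) (hg : g ∈ l) :
    ∃ k : Nat, PySem.List.index? l g = some k ∧ (k : Int) ∈ (firstD l).values := by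
  have hs : (PySem.List.index? l g).isSome = true := (PySem.List.index?_isSome_iff l g).mpr hg
  obtain ⟨k, hk⟩ := Option.isSome_iff_exists.mp hs
  refine ⟨k, hk, ?_⟩
  have hget : (firstD l).get? g = some (k : Int) := by rw [firstD_get?, hk]; rfl
  have := PySem.Dict.mem_items_of_get?_eq_some _ hget
  exact List.mem_map.mpr ⟨(g, (k : Int)), this, rfl⟩

-- values of lastD lie in [0, length)
lemma lastD_values_lt (l : List String) (v : Int) (hv : v ∈ (lastD l).values) :
    0 ≤ v ∧ v < (l.length : Int) := by
  induction l using List.reverseRecOn with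
  | nil => simp [lastD, PySem.List.enumerate, PySem.Dict.values, PySem.Dict.empty] at hv
  | append_singleton l x ih =>
    rw [lastD_concat] at hv
    rcases PySem.Dict.mem_values_insert _ _ _ _ hv with rfl | hv'
    · refine ⟨by positivity, ?_⟩
      simp only [List.length_append, List.length_cons, List.length_nil]
      push_cast
      omega
    · obtain ⟨h0, h1⟩ := ih hv'
      refine ⟨h0, lt_of_lt_of_le h1 ?_⟩
      simp only [List.length_append, List.length_cons, List.length_nil]
      push_cast
      omega

-- length - 1 is a value of lastD (the last element's index)
lemma lastD_values_last (l : List String) (hne : l ≠ []) :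
    ((l.length : Int) - 1) ∈ (lastD l).values := by
  obtain ⟨l', x, rfl⟩ := List.eq_nil_or_concat l |>.resolve_left hne
  rw [List.concat_eq_append, lastD_concat]
  have hl : ((l' ++ [x]).length : Int) - 1 = (l'.length : Int) := by
    simp only [List.length_append, List.length_cons, List.length_nil]
    push_cast
    ring
  rw [hl]
  exact List.mem_map.mpr ⟨(x, (l'.length : Int)), PySem.Dict.mem_items_insert_self _ _ _, rfl⟩

lemma dedup_concat (l : List String) (x : String) :
    PySem.List.dedup (l ++ [x]) =
      if x ∈ l then PySem.List.dedup l else PySem.List.dedup l ++ [x] := by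
  have hstep : PySem.List.dedup (l ++ [x]) = PySem.Set.add (PySem.List.dedup l) x := by
    simp [PySem.List.dedup, PySem.Set.ofList, List.foldl_append]
  rw [hstep]
  simp only [PySem.Set.add]
  by_cases hx : x ∈ l
  · have hc : PySem.Set.contains (PySem.List.dedup l) x = true := by
      simp only [PySem.Set.contains, List.contains_iff_mem]
      exact (PySem.List.mem_dedup l x).mpr hx
    rw [if_pos hc, if_pos hx]
  · have hc : ¬ PySem.Set.contains (PySem.List.dedup l) x = true := by
      simp only [PySem.Set.contains, List.contains_iff_mem]
      exact fun h => hx ((PySem.List.mem_dedup l x).mp h)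
    rw [if_neg hc, if_neg hx]

lemma fold_eq_dedup (gems : List String) :
    gems.foldl (fun gl g => if g ∈ gl then gl else gl ++ [g]) [] = PySem.List.dedup gems := by
  simp only [PySem.List.dedup, PySem.Set.ofList, PySem.Set.empty]
  congr 1
  funext gl g
  simp [PySem.Set.add]

lemma take_succ_concat (l : List String) (i : Nat) (h : i < l.length) :
    l.take (i + 1) = l.take i ++ [l[i]] := by
  rw [List.take_add_one, List.getElem?_eq_getElem h]
  rfl

-- dedup of a prefix that misses an element of gems is strictly incomplete
lemma incomplete_length (gems : List String) (i m : Nat) (him : i ≤ m) (hm : m < gems.length)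
    (hfirst : gems[m] ∉ gems.take m) :
    (PySem.List.dedup (gems.take i)).length ≠ (PySem.List.dedup gems).length := by
  intro hlen
  have hsub : PySem.List.dedup (gems.take i) ⊆ PySem.List.dedup gems := by
    intro x hx
    exact (PySem.List.mem_dedup _ _).mpr (List.take_subset _ _ ((PySem.List.mem_dedup _ _).mp hx))
  have hsp : List.Subperm (PySem.List.dedup (gems.take i)) (PySem.List.dedup gems) :=
    (PySem.List.nodup_dedup _).subperm hsub
  have hperm : List.Perm (PySem.List.dedup (gems.take i)) (PySem.List.dedup gems) :=
    hsp.perm_of_length_le (le_of_eq hlen.symm)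
  have : gems[m] ∈ PySem.List.dedup (gems.take i) :=
    hperm.mem_iff.mpr ((PySem.List.mem_dedup _ _).mpr (List.getElem_mem hm))
  have : gems[m] ∈ gems.take m := by
    have h1 : gems[m] ∈ gems.take i := (PySem.List.mem_dedup _ _).mp this
    have : gems.take i = (gems.take m).take i := by rw [List.take_take, min_eq_left him]
    exact List.take_subset _ _ (this ▸ h1)
  exact hfirst this

-- a prefix containing every element has a complete dedup
lemma complete_length (gems : List String) (m : Nat)
    (hcomp : ∀ g ∈ gems, g ∈ gems.take (m + 1)) :
    (PySem.List.dedup (gems.take (m + 1))).length = (PySem.List.dedup gems).length := by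
  have h1 : PySem.List.dedup (gems.take (m + 1)) ⊆ PySem.List.dedup gems := by
    intro x hx
    exact (PySem.List.mem_dedup _ _).mpr (List.take_subset _ _ ((PySem.List.mem_dedup _ _).mp hx))
  have h2 : PySem.List.dedup gems ⊆ PySem.List.dedup (gems.take (m + 1)) := by
    intro x hx
    exact (PySem.List.mem_dedup _ _).mpr (hcomp x ((PySem.List.mem_dedup _ _).mp hx))
  have hsp1 := (PySem.List.nodup_dedup (gems.take (m + 1))).subperm h1
  have hsp2 := (PySem.List.nodup_dedup gems).subperm h2
  exact le_antisymm hsp1.length_le hsp2.length_le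

-- the heart: A's loop, started anywhere in the window with the loop invariant,
-- ends with the last-occurrence dict of the window gems[0..m]
lemma loop_run (gems : List String) (m : Nat) (hm : m < gems.length)
    (hfirst : gems[m] ∉ gems.take m)
    (hcomp : ∀ g ∈ gems, g ∈ gems.take (m + 1)) :
    ∀ k i, i ≤ m + 1 → m + 1 - i = k →
      solutionLoop gems i (PySem.List.dedup (gems.take i)) (lastD (gems.take i))
          (PySem.List.dedup gems).length
        = lastD (gems.take (m + 1)) := by
  intro k
  induction k with
  | zero =>
    intro i hi hk
    have : i = m + 1 := by omega
    subst this
    rw [solutionLoop]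
    by_cases h : m + 1 < gems.length
    · rw [dif_pos h]
      have hmem : gems[m + 1] ∈ PySem.List.dedup (gems.take (m + 1)) :=
        (PySem.List.mem_dedup _ _).mpr (hcomp _ (List.getElem_mem h))
      rw [if_neg (by simpa using hmem), if_pos (complete_length gems m hcomp)]
    · rw [dif_neg h]
  | succ k ih =>
    intro i hi hk
    have hilt : i ≤ m := by omega
    have hin : i < gems.length := by omega
    rw [solutionLoop, dif_pos hin]
    have hstep : gems.take (i + 1) = gems.take i ++ [gems[i]] := take_succ_concat gems i hin
    have hlen_take : (gems.take i).length = i := List.length_take_of_le (le_of_lt hin)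
    have hins : (lastD (gems.take i)).insert gems[i] (i : Int) = lastD (gems.take (i + 1)) := by
      rw [hstep, lastD_concat, hlen_take]
    by_cases hv : gems[i] ∈ PySem.List.dedup (gems.take i)
    · rw [if_neg (by simpa using hv),
        if_neg (incomplete_length gems i m hilt hm hfirst)]
      have hvd : PySem.List.dedup (gems.take (i + 1)) = PySem.List.dedup (gems.take i) := by
        rw [hstep, dedup_concat, if_pos ((PySem.List.mem_dedup _ _).mp hv)]
      rw [hins, ← hvd]
      exact ih (i + 1) (by omega) (by omega)
    · rw [if_pos (by simpa using hv)]
      have hvd : PySem.List.dedup (gems.take i) ++ [gems[i]]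
          = PySem.List.dedup (gems.take (i + 1)) := by
        rw [hstep, dedup_concat,
          if_neg (fun h => hv ((PySem.List.mem_dedup _ _).mpr h))]
      rw [hins, hvd]
      exact ih (i + 1) (by omega) (by omega)

-- ===== VERDICT (by name: the statement is the Claim_ definition above) =====
theorem solution_spec : Claim_equal_solution := by
  intro gems _ hpre
  unfold Spec_solution
  simp only [solution, solution_alt]
  -- B's first pass is firstD
  have hfd : (PySem.List.enumerate gems).foldl
      (fun d p => if d.contains p.2 then d else d.insert p.2 p.1) PySem.Dict.empty
      = firstD gems := rfl
  rw [hfd]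
  -- firstD's values are nonempty, so max? returns some f
  obtain ⟨g0, hg0⟩ := List.exists_mem_of_ne_nil gems hpre
  obtain ⟨k0, hk0, hk0v⟩ := firstD_values_cover gems g0 hg0
  have hne : (firstD gems).values ≠ [] := List.ne_nil_of_mem hk0v
  obtain ⟨f, hf⟩ : ∃ f, PySem.List.max? (firstD gems).values (fun x => x) = some f := by
    cases hmx : PySem.List.max? (firstD gems).values (fun x => x) with
    | none => exact absurd ((PySem.List.max?_eq_none_iff _ _).mp hmx) hne
    | some f => exact ⟨f, rfl⟩
  rw [hf]
  -- f is a first-occurrence index m, maximal among them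
  obtain ⟨m, rfl, hmlt, hmfirst⟩ := firstD_values_mem gems f (PySem.List.max?_mem hf)
  have hmax : ∀ v ∈ (firstD gems).values, v ≤ (m : Int) := PySem.List.max?_isMax hf
  -- every gem occurs in the window gems[0..m]
  have hcomp : ∀ g ∈ gems, g ∈ gems.take (m + 1) := by
    intro g hg
    obtain ⟨k, hk, hkv⟩ := firstD_values_cover gems g hg
    have hkm : k ≤ m := by exact_mod_cast hmax _ hkv
    obtain ⟨hklt, hgk, _⟩ := PySem.List.getElem_of_index?_eq_some hk
    have : k < (gems.take (m + 1)).length := by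
      rw [List.length_take]; omega
    have := List.getElem_mem this
    rwa [List.getElem_take, hgk] at this
  -- B's window is gems.take (m+1), so both dicts are lastD (gems.take (m+1))
  have hwin : PySem.List.slice gems (some 0) (some ((m : Int) + 1)) = gems.take (m + 1) := by
    rw [PySem.List.slice_zero_start, PySem.List.slice_to gems (by positivity)]
    have hnat : (((m : Int) + 1)).toNat = m + 1 := by omega
    rw [hnat]
  dsimp only
  rw [hwin]
  have hloop := loop_run gems m hmlt hmfirst hcomp (m + 1) 0 (by omega) (by omega)
  simp only [List.take_zero] at hloop
  have hd0 : PySem.List.dedup ([] : List String) = [] := rfl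
  have hl0 : lastD [] = PySem.Dict.empty := rfl
  rw [hd0, hl0] at hloop
  have hld : (PySem.List.enumerate (gems.take (m + 1))).foldl
      (fun d p => d.insert p.2 p.1) PySem.Dict.empty = lastD (gems.take (m + 1)) := rfl
  rw [fold_eq_dedup, hloop, hld]
  -- the shared dict: its values are nonempty, and their max is m
  have hwne : gems.take (m + 1) ≠ [] := by
    intro h
    have h1 := congrArg List.length h
    rw [List.length_take] at h1
    simp only [List.length_nil] at h1
    omega
  have hlastne : ((m : Int)) ∈ (lastD (gems.take (m + 1))).values := by
    have := lastD_values_last (gems.take (m + 1)) hwne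
    have hlen : ((gems.take (m + 1)).length : Int) - 1 = (m : Int) := by
      rw [List.length_take_of_le (by omega)]
      push_cast
      ring
    rwa [hlen] at this
  have hvne : (lastD (gems.take (m + 1))).values ≠ [] := List.ne_nil_of_mem hlastne
  obtain ⟨mn, hmn⟩ : ∃ mn, PySem.List.min? (lastD (gems.take (m + 1))).values (fun x => x) = some mn := by
    cases hx : PySem.List.min? (lastD (gems.take (m + 1))).values (fun x => x) with
    | none => exact absurd ((PySem.List.min?_eq_none_iff _ _).mp hx) hvne
    | some mn => exact ⟨mn, rfl⟩
  obtain ⟨mx, hmx⟩ : ∃ mx, PySem.List.max? (lastD (gems.take (m + 1))).values (fun x => x) = some mx := by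
    cases hx : PySem.List.max? (lastD (gems.take (m + 1))).values (fun x => x) with
    | none => exact absurd ((PySem.List.max?_eq_none_iff _ _).mp hx) hvne
    | some mx => exact ⟨mx, rfl⟩
  have hmxval : mx = (m : Int) := by
    have h1 : mx ≤ (m : Int) := by
      have := (lastD_values_lt _ _ (PySem.List.max?_mem hmx)).2
      rw [List.length_take_of_le (by omega)] at this
      push_cast at this
      omega
    have h2 : (m : Int) ≤ mx := PySem.List.max?_isMax hmx _ hlastne
    omega
  rw [hmn, hmx, hmxval]
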